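-- pv_equiv track=rewrite | github.com/pelioo/AGIAgent | src/tool_executor.py | _get_recent_history_subset
-- ===== SOURCE A (Python) =====
-- from typing import Dict, Any, List, Optional, Union, Tuple
--
-- def _get_recent_history_subset(task_history: List[Dict[str, Any]], max_length: int) -> List[Dict[str, Any]]:
--     """
--     Get a subset of recent history that doesn't exceed the maximum length.
--
--     Args:
--         task_history: Full task history
--         max_length: Maximum allowed character length
--
--     Returns:
--         Subset of recent history records
--     """
--     if not task_history:
--         return []
--
--     # Start from the most recent records and work backwards
--     recent_history = []
--     current_length = 0
--
--     for record in reversed(task_history):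
--         # Calculate the length of this record
--         record_length = len(str(record.get("content", ""))) + len(str(record.get("result", ""))) + len(str(record.get("prompt", "")))
--
--         # Check if adding this record would exceed the limit
--         if current_length + record_length > max_length and recent_history:
--             break
--
--         recent_history.insert(0, record)
--         current_length += record_length
--
--     return recent_history
-- ===== SOURCE B (Python) =====
-- from itertools import accumulate
-- from bisect import bisect_right
-- from typing import Dict, Any, List
--
--
-- def _get_recent_history_subset(task_history: List[Dict[str, Any]], max_length: int) -> List[Dict[str, Any]]:
--     """Table-and-search version: build per-record lengths, take cumulative sums of the
--     reversed lengths, and locate via bisect how many trailing records fit in the budget."""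
--     if not task_history:
--         return []
--     lengths = [
--         len(str(r.get("content", ""))) + len(str(r.get("result", ""))) + len(str(r.get("prompt", "")))
--         for r in task_history
--     ]
--     suffix_sums = list(accumulate(reversed(lengths)))
--     k = bisect_right(suffix_sums, max_length)
--     return task_history[len(task_history) - max(1, k):]
-- ===== Notes on version B (the rewrite author's own statement) =====
-- stated objective: alternative
-- what changed: Replaces A's incremental reversed-loop with early break by a precomputed table of suffix cumulative length sums searched with bisect_right, then one slice of the original list.
import Mathlib
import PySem

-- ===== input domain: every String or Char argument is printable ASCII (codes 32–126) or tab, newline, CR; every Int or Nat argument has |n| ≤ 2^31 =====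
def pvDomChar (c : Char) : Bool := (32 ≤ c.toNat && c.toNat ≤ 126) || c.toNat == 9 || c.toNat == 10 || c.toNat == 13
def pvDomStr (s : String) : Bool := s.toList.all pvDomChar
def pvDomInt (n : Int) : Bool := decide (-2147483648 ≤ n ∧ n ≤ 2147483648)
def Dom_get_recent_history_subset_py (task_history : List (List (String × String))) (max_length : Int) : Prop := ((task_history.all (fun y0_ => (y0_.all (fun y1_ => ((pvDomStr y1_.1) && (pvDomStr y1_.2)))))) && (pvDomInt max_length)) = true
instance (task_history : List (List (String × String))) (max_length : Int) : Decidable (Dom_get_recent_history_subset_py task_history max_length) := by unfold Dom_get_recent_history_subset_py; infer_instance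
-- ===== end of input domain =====

-- B replaces A's incremental reversed-loop with a precomputed table of suffix cumulative
-- length sums searched by bisect_right, then one slice (alternative decomposition, same cost).

-- ===== PORT A =====
-- len(str(record.get("content",""))) + len(str(record.get("result",""))) + len(str(record.get("prompt","")))
def pvRecLen (r : List (String × String)) : Int :=
  PySem.Str.len ((PySem.Dict.mk r).getD "content" "") +
  PySem.Str.len ((PySem.Dict.mk r).getD "result" "") +
  PySem.Str.len ((PySem.Dict.mk r).getD "prompt" "")

-- the `for record in reversed(task_history)` loop; state = (recent_history, current_length);
-- `recent_history.insert(0, record)` is cons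
def pvLoopA (M : Int) : List (List (String × String)) → List (List (String × String)) → Int → List (List (String × String))
  | [], recent, _ => recent
  | r :: rs, recent, cur =>
    if cur + pvRecLen r > M ∧ recent ≠ [] then recent
    else pvLoopA M rs (r :: recent) (cur + pvRecLen r)

def get_recent_history_subset_py (task_history : List (List (String × String))) (max_length : Int) : List (List (String × String)) :=
  if task_history = [] then []
  else pvLoopA max_length task_history.reverse [] 0

-- ===== PORT B =====
-- itertools.accumulate (running partial sums, here with explicit start 0)
def pvAccum (cur : Int) : List Int → List Int
  | [] => []
  | x :: xs => (cur + x) :: pvAccum (cur + x) xs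

def get_recent_history_subset_py_alt (task_history : List (List (String × String))) (max_length : Int) : List (List (String × String)) :=
  if task_history = [] then []
  else
    let lengths := task_history.map pvRecLen
    let suffix_sums := pvAccum 0 lengths.reverse
    let k := PySem.List.bisectRight suffix_sums max_length
    PySem.List.slice task_history (some ((task_history.length : Int) - max 1 (k : Int))) none

-- ===== PRECONDITION & SPEC =====
def Spec_get_recent_history_subset_py (task_history : List (List (String × String))) (max_length : Int) (out : List (List (String × String))) : Prop := out = get_recent_history_subset_py_alt task_history max_length
instance (task_history : List (List (String × String))) (max_length : Int) (out : List (List (String × String))) : Decidable (Spec_get_recent_history_subset_py task_history max_length out) := by unfold Spec_get_recent_history_subset_py; infer_instance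

-- ===== CLAIM (what is proved, stated in full; the proofs are below) =====
def Claim_equal_get_recent_history_subset_py : Prop := ∀ (task_history : List (List (String × String))) (max_length : Int), Dom_get_recent_history_subset_py task_history max_length → Spec_get_recent_history_subset_py task_history max_length (get_recent_history_subset_py task_history max_length)

-- ===== LEMMAS AND PROOFS =====

def pvCnt (M cur : Int) : List (List (String × String)) → Nat
  | [] => 0
  | r :: rs => if cur + pvRecLen r > M then 0 else pvCnt M (cur + pvRecLen r) rs + 1

theorem pvRecLen_nonneg (r : List (String × String)) : 0 ≤ pvRecLen r := by
  unfold pvRecLen; simp [PySem.Str.len_eq]; positivity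

theorem pvCnt_le (M : Int) (rs : List (List (String × String))) :
    ∀ cur, pvCnt M cur rs ≤ rs.length := by
  induction rs with
  | nil => intro cur; simp [pvCnt]
  | cons r rs ih =>
    intro cur
    simp only [pvCnt, List.length_cons]
    split_ifs with h
    · omega
    · have := ih (cur + pvRecLen r); omega

theorem pvCnt_zero_of_gt (M cur : Int) (rs : List (List (String × String))) (h : M < cur) :
    pvCnt M cur rs = 0 := by
  cases rs with
  | nil => rfl
  | cons r rs =>
    have := pvRecLen_nonneg r
    simp only [pvCnt]
    rw [if_pos (by omega)]

theorem pvLoopA_eq (M : Int) (rs : List (List (String × String))) :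
    ∀ recent cur, recent ≠ [] →
    pvLoopA M rs recent cur = (rs.take (pvCnt M cur rs)).reverse ++ recent := by
  induction rs with
  | nil => intro recent cur _; simp [pvLoopA, pvCnt]
  | cons r rs ih =>
    intro recent cur hne
    simp only [pvLoopA, pvCnt]
    by_cases h : cur + pvRecLen r > M
    · rw [if_pos ⟨h, hne⟩, if_pos h]; simp
    · rw [if_neg (by tauto), if_neg h, ih (r :: recent) (cur + pvRecLen r) (by simp)]
      simp

theorem pvAccum_length (cur : Int) (xs : List Int) : (pvAccum cur xs).length = xs.length := by
  induction xs generalizing cur with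
  | nil => rfl
  | cons x xs ih => simp [pvAccum, ih]

theorem pvAccum_ge (xs : List Int) (h : ∀ x ∈ xs, 0 ≤ x) :
    ∀ cur, ∀ y ∈ pvAccum cur xs, cur ≤ y := by
  induction xs with
  | nil => intro cur y hy; simp [pvAccum] at hy
  | cons x xs ih =>
    intro cur y hy
    have hx : 0 ≤ x := h x (by simp)
    simp only [pvAccum, List.mem_cons] at hy
    rcases hy with rfl | hy
    · omega
    · have := ih (fun z hz => h z (by simp [hz])) (cur + x) y hy; omega

theorem pvAccum_pairwise (xs : List Int) (h : ∀ x ∈ xs, 0 ≤ x) :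
    ∀ cur, (pvAccum cur xs).Pairwise (· ≤ ·) := by
  induction xs with
  | nil => intro cur; simp [pvAccum]
  | cons x xs ih =>
    intro cur
    simp only [pvAccum, List.pairwise_cons]
    refine ⟨fun y hy => pvAccum_ge xs (fun z hz => h z (by simp [hz])) (cur + x) y hy,
      ih (fun z hz => h z (by simp [hz])) (cur + x)⟩

theorem pvAcc_getElem_iff (M : Int) (rs : List (List (String × String))) :
    ∀ cur (j : Nat) (hj : j < (pvAccum cur (rs.map pvRecLen)).length),
      ((pvAccum cur (rs.map pvRecLen))[j] ≤ M ↔ j < pvCnt M cur rs) := by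
  induction rs with
  | nil => intro cur j hj; simp [pvAccum] at hj
  | cons r rs ih =>
    intro cur j hj
    have hj' : j < (pvAccum (cur + pvRecLen r) (rs.map pvRecLen)).length + 1 := by
      simpa [pvAccum] using hj
    simp only [List.map_cons, pvAccum, pvCnt]
    cases j with
    | zero =>
      simp only [List.getElem_cons_zero]
      split_ifs with h
      · omega
      · constructor
        · intro _; omega
        · intro _; omega
    | succ j =>
      simp only [List.getElem_cons_succ]
      split_ifs with h
      · have hmem : (pvAccum (cur + pvRecLen r) (rs.map pvRecLen))[j] ∈
            pvAccum (cur + pvRecLen r) (rs.map pvRecLen) := List.getElem_mem (by omega)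
        have := pvAccum_ge (rs.map pvRecLen)
          (by intro x hx; simp only [List.mem_map] at hx; obtain ⟨a, _, rfl⟩ := hx; exact pvRecLen_nonneg a)
          (cur + pvRecLen r) _ hmem
        constructor
        · intro hle; omega
        · intro hlt; omega
      · have := ih (cur + pvRecLen r) j (by omega)
        rw [this]; omega

theorem pvBisect_eq_cnt (M cur : Int) (rs : List (List (String × String))) :
    PySem.List.bisectRight (pvAccum cur (rs.map pvRecLen)) M = pvCnt M cur rs := by
  have hnn : ∀ x ∈ rs.map pvRecLen, 0 ≤ x := by
    intro x hx; simp only [List.mem_map] at hx; obtain ⟨a, _, rfl⟩ := hx; exact pvRecLen_nonneg a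
  obtain ⟨hk_le, hk_lo, hk_hi⟩ :=
    PySem.List.bisectRight_spec (pvAccum cur (rs.map pvRecLen)) M (pvAccum_pairwise _ hnn cur)
  set k := PySem.List.bisectRight (pvAccum cur (rs.map pvRecLen)) M with hk
  have hlen : (pvAccum cur (rs.map pvRecLen)).length = rs.length := by
    rw [pvAccum_length]; simp
  have hcle := pvCnt_le M rs cur
  by_contra hne
  rcases Nat.lt_or_ge k (pvCnt M cur rs) with hlt | hge
  · have hjlt : k < (pvAccum cur (rs.map pvRecLen)).length := by omega
    have h1 := (pvAcc_getElem_iff M rs cur k hjlt).mpr hlt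
    have h2 := hk_hi k hjlt (le_refl _)
    omega
  · have hlt : pvCnt M cur rs < k := by omega
    have hjlt : pvCnt M cur rs < (pvAccum cur (rs.map pvRecLen)).length := by omega
    have h1 := hk_lo (pvCnt M cur rs) hjlt hlt
    have h2 := (pvAcc_getElem_iff M rs cur _ hjlt).mp h1
    omega

theorem main_eq (th : List (List (String × String))) (M : Int) :
    get_recent_history_subset_py th M = get_recent_history_subset_py_alt th M := by
  unfold get_recent_history_subset_py get_recent_history_subset_py_alt
  by_cases hth : th = []
  · simp [hth]
  · rw [if_neg hth, if_neg hth]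
    cases hrev : th.reverse with
    | nil => exact absurd (by simpa using congrArg List.reverse hrev) hth
    | cons r rs =>
      -- B side: identify k
      have hmaprev : (th.map pvRecLen).reverse = (r :: rs).map pvRecLen := by
        rw [← List.map_reverse, hrev]
      have hk : PySem.List.bisectRight (pvAccum 0 ((th.map pvRecLen).reverse)) M
          = pvCnt M 0 (r :: rs) := by
        rw [hmaprev]; exact pvBisect_eq_cnt M 0 (r :: rs)
      have hcnt : pvCnt M 0 (r :: rs)
          = if pvRecLen r > M then 0 else pvCnt M (pvRecLen r) rs + 1 := by
        simp only [pvCnt, zero_add]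
      have hmax : max 1 ((pvCnt M 0 (r :: rs) : Nat) : Int)
          = ((pvCnt M (pvRecLen r) rs : Int) + 1) := by
        rw [hcnt]
        split_ifs with h
        · have h0 : pvCnt M (pvRecLen r) rs = 0 := pvCnt_zero_of_gt M (pvRecLen r) rs (by omega)
          simp [h0]
        · omega
      have hclen : pvCnt M (pvRecLen r) rs + 1 ≤ th.length := by
        have h1 := pvCnt_le M rs (pvRecLen r)
        have h2 : th.length = rs.length + 1 := by
          have := congrArg List.length hrev; simpa using this
        omega
      have harg : ((th.length : Int) - ((pvCnt M (pvRecLen r) rs : Int) + 1))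
          = ((th.length - (pvCnt M (pvRecLen r) rs + 1) : Nat) : Int) := by
        push_cast; omega
      -- A side
      have hA : pvLoopA M (r :: rs) [] 0
          = ((r :: rs).take (pvCnt M (pvRecLen r) rs + 1)).reverse := by
        simp only [pvLoopA]
        rw [if_neg (by simp), pvLoopA_eq M rs [r] (0 + pvRecLen r) (by simp), zero_add]
        simp [List.take_succ_cons]
      show pvLoopA M (r :: rs) [] 0 =
        PySem.List.slice th (some ((th.length : Int) -
          max 1 ((PySem.List.bisectRight (pvAccum 0 ((th.map pvRecLen).reverse)) M : Nat) : Int))) none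
      rw [hA, hk, hmax, harg, PySem.List.slice_from_natCast, ← hrev, List.take_reverse,
        List.reverse_reverse]

-- ===== VERDICT (by name: the statement is the Claim_ definition above) =====
theorem get_recent_history_subset_py_spec : Claim_equal_get_recent_history_subset_py := by
  intro th M _
  unfold Spec_get_recent_history_subset_py
  exact main_eq th M
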